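-- pv_equiv track=rewrite | github.com/datahub-project/datahub | semantic-search-poc/embedding_text_generator_v3.py | _summarize_fields
-- ===== SOURCE A (Python) =====
-- from typing import Dict, List, Any, Optional
--
-- def _summarize_fields(fields: List[str]) -> Optional[str]:
--     """Summarize fields into semantic roles instead of listing many names."""
--     if not fields:
--         return None
--     roles: List[str] = []
--     lower_fields = [f.lower() for f in fields]
--     if any('id' in f and any(k in f for k in ['user', 'profile', 'customer', 'account']) for f in lower_fields):
--         roles.append('identifiers')
--     if any('status' in f for f in lower_fields):
--         roles.append('status')
--     if any(any(k in f for k in ['date', 'time', 'timestamp']) for f in lower_fields):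
--         roles.append('timestamps')
--     if any(any(k in f for k in ['amount', 'price', 'value', 'revenue']) for f in lower_fields):
--         roles.append('numeric measures')
--     if any('name' in f for f in lower_fields):
--         roles.append('names')
--     if not roles:
--         return None
--     if len(roles) == 1:
--         return f"Tracks {roles[0]}"
--     if len(roles) == 2:
--         return f"Tracks {roles[0]} and {roles[1]}"
--     return f"Tracks {', '.join(roles[:-1])}, and {roles[-1]}"
-- ===== SOURCE B (Python) =====
-- from typing import List, Optional
--
-- def _summarize_fields(fields: List[str]) -> Optional[str]:
--     """One pass over the lowercased fields sets five role flags, then formats."""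
--     if not fields:
--         return None
--     has_ident = has_status = has_time = has_num = has_name = False
--     for field in fields:
--         g = field.lower()
--         if 'id' in g and ('user' in g or 'profile' in g or 'customer' in g or 'account' in g):
--             has_ident = True
--         if 'status' in g:
--             has_status = True
--         if 'date' in g or 'time' in g:
--             has_time = True
--         if 'amount' in g or 'price' in g or 'value' in g or 'revenue' in g:
--             has_num = True
--         if 'name' in g:
--             has_name = True
--     roles = []
--     if has_ident:
--         roles.append('identifiers')
--     if has_status:
--         roles.append('status')
--     if has_time:
--         roles.append('timestamps')
--     if has_num:
--         roles.append('numeric measures')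
--     if has_name:
--         roles.append('names')
--     if not roles:
--         return None
--     first, *rest = roles
--     if not rest:
--         return "Tracks " + first
--     if len(rest) == 1:
--         return "Tracks " + first + " and " + rest[0]
--     return "Tracks " + ", ".join(roles[:-1]) + ", and " + roles[-1]
-- ===== Notes on version B (the rewrite author's own statement) =====
-- stated objective: faster
-- what changed: B replaces A's five independent any()-scans over a rebuilt lowercase list with a single pass that lowercases each field once and sets five boolean flags (dropping the redundant 'timestamp' keyword subsumed by 'time'), then emits the roles in order and formats by destructuring the roles list instead of length tests.
import Mathlib
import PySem

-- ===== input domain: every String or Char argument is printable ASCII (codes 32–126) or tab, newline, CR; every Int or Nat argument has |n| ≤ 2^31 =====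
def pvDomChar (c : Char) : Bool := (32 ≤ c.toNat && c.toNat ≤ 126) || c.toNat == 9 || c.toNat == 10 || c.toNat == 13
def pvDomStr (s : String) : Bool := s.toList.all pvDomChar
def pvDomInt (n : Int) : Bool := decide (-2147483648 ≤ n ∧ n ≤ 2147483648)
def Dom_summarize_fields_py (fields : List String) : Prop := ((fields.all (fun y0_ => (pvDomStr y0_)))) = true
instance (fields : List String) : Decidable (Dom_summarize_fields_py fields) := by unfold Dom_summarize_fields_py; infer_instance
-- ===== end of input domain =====

-- B makes one pass over the fields setting five role flags (lowercasing each field once and dropping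
-- the redundant 'timestamp' keyword, subsumed by 'time') instead of A's five any()-scans over a
-- rebuilt lowercase list, and formats by destructuring the roles list; the return values are identical.

-- ===== PORT A =====
def summarize_fields_py (fields : List String) : Option String :=
  if fields = [] then none else
  let lower_fields := fields.map (fun f => PySem.Str.lower f)
  let roles : List String := []
  let roles := if lower_fields.any (fun f => PySem.Str.isIn "id" f &&
      (["user", "profile", "customer", "account"].any (fun k => PySem.Str.isIn k f)))
    then roles ++ ["identifiers"] else roles
  let roles := if lower_fields.any (fun f => PySem.Str.isIn "status" f)
    then roles ++ ["status"] else roles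
  let roles := if lower_fields.any (fun f => ["date", "time", "timestamp"].any (fun k => PySem.Str.isIn k f))
    then roles ++ ["timestamps"] else roles
  let roles := if lower_fields.any (fun f => ["amount", "price", "value", "revenue"].any (fun k => PySem.Str.isIn k f))
    then roles ++ ["numeric measures"] else roles
  let roles := if lower_fields.any (fun f => PySem.Str.isIn "name" f)
    then roles ++ ["names"] else roles
  if roles = [] then none
  else if PySem.List.len roles = 1 then some ("Tracks " ++ PySem.List.pyGetD roles 0 "")
  else if PySem.List.len roles = 2 then
    some ("Tracks " ++ PySem.List.pyGetD roles 0 "" ++ " and " ++ PySem.List.pyGetD roles 1 "")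
  else
    some ("Tracks " ++ PySem.Str.join ", " (PySem.List.slice roles none (some (-1))) ++
      ", and " ++ PySem.List.pyGetD roles (-1) "")

-- ===== PORT B =====
def summarize_fields_py_alt (fields : List String) : Option String :=
  match fields with
  | [] => none
  | _ :: _ =>
    let fl := fields.foldl (fun (fl : Bool × Bool × Bool × Bool × Bool) field =>
      let g := PySem.Str.lower field
      (fl.1 || (PySem.Str.isIn "id" g && (PySem.Str.isIn "user" g || PySem.Str.isIn "profile" g ||
                 PySem.Str.isIn "customer" g || PySem.Str.isIn "account" g)),
       fl.2.1 || PySem.Str.isIn "status" g,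
       fl.2.2.1 || (PySem.Str.isIn "date" g || PySem.Str.isIn "time" g),
       fl.2.2.2.1 || (PySem.Str.isIn "amount" g || PySem.Str.isIn "price" g ||
                      PySem.Str.isIn "value" g || PySem.Str.isIn "revenue" g),
       fl.2.2.2.2 || PySem.Str.isIn "name" g)) (false, false, false, false, false)
    let roles : List String :=
      (if fl.1 then ["identifiers"] else []) ++ (if fl.2.1 then ["status"] else []) ++
      (if fl.2.2.1 then ["timestamps"] else []) ++ (if fl.2.2.2.1 then ["numeric measures"] else []) ++
      (if fl.2.2.2.2 then ["names"] else [])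
    match roles with
    | [] => none
    | [r] => some ("Tracks " ++ r)
    | [r1, r2] => some ("Tracks " ++ r1 ++ " and " ++ r2)
    | _ => some ("Tracks " ++ PySem.Str.join ", " roles.dropLast ++ ", and " ++ (roles.getLast?.getD ""))

-- ===== PRECONDITION & SPEC =====
def Spec_summarize_fields_py (fields : List String) (out : Option String) : Prop := out = summarize_fields_py_alt fields
instance (fields : List String) (out : Option String) : Decidable (Spec_summarize_fields_py fields out) := by unfold Spec_summarize_fields_py; infer_instance

-- ===== CLAIM (what is proved, stated in full; the proofs are below) =====
def Claim_equal_summarize_fields_py : Prop := ∀ (fields : List String), Dom_summarize_fields_py fields → Spec_summarize_fields_py fields (summarize_fields_py fields)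

-- ===== LEMMAS AND PROOFS =====

-- The five per-field role predicates B tests (on the lowercased field), named for the proofs.
def pvQ1 (f : String) : Bool :=
  PySem.Str.isIn "id" (PySem.Str.lower f) && (PySem.Str.isIn "user" (PySem.Str.lower f) ||
    PySem.Str.isIn "profile" (PySem.Str.lower f) || PySem.Str.isIn "customer" (PySem.Str.lower f) ||
    PySem.Str.isIn "account" (PySem.Str.lower f))
def pvQ2 (f : String) : Bool := PySem.Str.isIn "status" (PySem.Str.lower f)
def pvQ3 (f : String) : Bool := PySem.Str.isIn "date" (PySem.Str.lower f) || PySem.Str.isIn "time" (PySem.Str.lower f)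
def pvQ4 (f : String) : Bool := PySem.Str.isIn "amount" (PySem.Str.lower f) || PySem.Str.isIn "price" (PySem.Str.lower f) ||
    PySem.Str.isIn "value" (PySem.Str.lower f) || PySem.Str.isIn "revenue" (PySem.Str.lower f)
def pvQ5 (f : String) : Bool := PySem.Str.isIn "name" (PySem.Str.lower f)

-- 'time' is a substring of 'timestamp', so A's extra 'timestamp' keyword is redundant.
lemma ts_imp (g : String) : PySem.Str.isIn "timestamp" g = true → PySem.Str.isIn "time" g = true := by
  intro h
  rw [PySem.Str.isIn_iff_infix] at h ⊢
  exact List.IsInfix.trans (by decide) h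

lemma cond1 (l : List String) :
    (l.map (fun f => PySem.Str.lower f)).any
      (fun f => PySem.Str.isIn "id" f && (["user", "profile", "customer", "account"].any (fun k => PySem.Str.isIn k f))) = l.any pvQ1 := by
  rw [List.any_map]; congr 1; funext f
  simp [Function.comp, pvQ1, Bool.or_assoc]

lemma cond2 (l : List String) :
    (l.map (fun f => PySem.Str.lower f)).any (fun f => PySem.Str.isIn "status" f) = l.any pvQ2 := by
  rw [List.any_map]; rfl

lemma cond3 (l : List String) :
    (l.map (fun f => PySem.Str.lower f)).any
      (fun f => ["date", "time", "timestamp"].any (fun k => PySem.Str.isIn k f)) = l.any pvQ3 := by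
  rw [List.any_map]; congr 1; funext f
  simp only [Function.comp, List.any_cons, List.any_nil, Bool.or_false, pvQ3]
  cases h : PySem.Str.isIn "timestamp" (PySem.Str.lower f)
  · simp
  · rw [ts_imp _ h]; simp

lemma cond4 (l : List String) :
    (l.map (fun f => PySem.Str.lower f)).any
      (fun f => ["amount", "price", "value", "revenue"].any (fun k => PySem.Str.isIn k f)) = l.any pvQ4 := by
  rw [List.any_map]; congr 1; funext f
  simp [Function.comp, pvQ4, Bool.or_assoc]

lemma cond5 (l : List String) :
    (l.map (fun f => PySem.Str.lower f)).any (fun f => PySem.Str.isIn "name" f) = l.any pvQ5 := by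
  rw [List.any_map]; rfl

-- B's single fold computes exactly the five 'does any field satisfy pvQi' flags.
lemma fold_flags (l : List String) (a b c d e : Bool) :
    l.foldl (fun (fl : Bool × Bool × Bool × Bool × Bool) field =>
      (fl.1 || (PySem.Str.isIn "id" (PySem.Str.lower field) && (PySem.Str.isIn "user" (PySem.Str.lower field) || PySem.Str.isIn "profile" (PySem.Str.lower field) ||
                 PySem.Str.isIn "customer" (PySem.Str.lower field) || PySem.Str.isIn "account" (PySem.Str.lower field))),
       fl.2.1 || PySem.Str.isIn "status" (PySem.Str.lower field),
       fl.2.2.1 || (PySem.Str.isIn "date" (PySem.Str.lower field) || PySem.Str.isIn "time" (PySem.Str.lower field)),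
       fl.2.2.2.1 || (PySem.Str.isIn "amount" (PySem.Str.lower field) || PySem.Str.isIn "price" (PySem.Str.lower field) ||
                      PySem.Str.isIn "value" (PySem.Str.lower field) || PySem.Str.isIn "revenue" (PySem.Str.lower field)),
       fl.2.2.2.2 || PySem.Str.isIn "name" (PySem.Str.lower field))) (a, b, c, d, e) =
    (a || l.any pvQ1, b || l.any pvQ2, c || l.any pvQ3, d || l.any pvQ4, e || l.any pvQ5) := by
  induction l generalizing a b c d e with
  | nil => simp
  | cons x xs ih =>
    rw [List.foldl_cons, ih]
    simp [List.any_cons, pvQ1, pvQ2, pvQ3, pvQ4, pvQ5, Bool.or_assoc]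

-- ===== VERDICT (by name: the statement is the Claim_ definition above) =====
theorem summarize_fields_py_spec : Claim_equal_summarize_fields_py := by
  intro fields _
  unfold Spec_summarize_fields_py
  cases fields with
  | nil => rfl
  | cons f fs =>
    simp only [summarize_fields_py, summarize_fields_py_alt]
    rw [fold_flags]
    simp only [Bool.false_or, List.cons_ne_nil, if_false, List.nil_append]
    rw [cond1, cond2, cond3, cond4, cond5]
    generalize (f :: fs).any pvQ1 = b1
    generalize (f :: fs).any pvQ2 = b2
    generalize (f :: fs).any pvQ3 = b3
    generalize (f :: fs).any pvQ4 = b4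
    generalize (f :: fs).any pvQ5 = b5
    revert b1 b2 b3 b4 b5
    decide
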